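-- pv_equiv track=rewrite | github.com/kimko/bmd-micro | project/api/models/rockworld.py | falling_rock
-- ===== SOURCE A (Python) =====
-- def falling_rock(segment):
--     """
--     orders the list based on "falling_rocks" rules. Super
--     slow algorithm comparable to bubble sort.
--     """
--     for _ in range(len(segment)):
--         for i in range(len(segment) - 1):
--             if segment[i] == '.' and segment[i + 1] == '.':
--                 segment[i], segment[i + 1] = ' ', ':'
--             if segment[i] == '.' and segment[i + 1] == ' ':
--                 segment[i], segment[i + 1] = ' ', '.'
--             if segment[i] == ':' and segment[i + 1] == ' ':
--                 segment[i], segment[i + 1] = ' ', ':'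
--             if segment[i] == ':' and segment[i + 1] == '.':
--                 segment[i], segment[i + 1] = '.', ':'
--     return segment
-- ===== SOURCE B (Python) =====
-- def _mass(c):
--     return 2 if c == ':' else 1 if c == '.' else 0
--
-- def _settle(n, t):
--     pairs, odd = divmod(t, 2)
--     return [' '] * (n - pairs - odd) + ['.'] * odd + [':'] * pairs
--
-- def falling_rock(segment):
--     """
--     Single counting pass: any cell other than ' ', '.' or ':' is an immovable
--     wall; between walls the conserved mass (':'=2, '.'=1) packs to the right as
--     ':' pairs with one '.' left over if odd.
--     Returns a new list; does not mutate its argument.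
--     """
--     out = []
--     n = t = 0
--     for c in segment:
--         if c == ' ' or c == '.' or c == ':':
--             n += 1
--             t += _mass(c)
--         else:
--             out += _settle(n, t)
--             out.append(c)
--             n = t = 0
--     out += _settle(n, t)
--     return out
-- ===== Notes on version B (the rewrite author's own statement) =====
-- stated objective: faster
-- what changed: Replaces the O(n^2) bubble-style pairwise-settling passes by a single counting pass: cells other than ' ', '.', ':' are immovable walls, and between walls the conserved mass (':'=2, '.'=1) is summed and emitted directly as spaces, then one '.' if the mass is odd, then mass//2 ':' cells.
import Mathlib
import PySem

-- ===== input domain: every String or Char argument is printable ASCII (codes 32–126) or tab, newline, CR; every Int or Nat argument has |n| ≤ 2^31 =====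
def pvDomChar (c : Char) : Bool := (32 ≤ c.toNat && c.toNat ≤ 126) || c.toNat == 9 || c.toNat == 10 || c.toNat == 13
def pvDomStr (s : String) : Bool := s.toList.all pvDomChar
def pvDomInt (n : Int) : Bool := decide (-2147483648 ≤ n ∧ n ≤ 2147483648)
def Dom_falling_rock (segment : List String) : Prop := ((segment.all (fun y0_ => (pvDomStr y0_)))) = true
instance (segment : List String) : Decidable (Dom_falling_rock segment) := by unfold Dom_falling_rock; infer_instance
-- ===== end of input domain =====

-- B replaces A's O(n^2) pairwise-settling passes by one counting pass per wall-separated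
-- chunk (sum the conserved mass and emit spaces/one-dot/colons directly); A mutates its
-- argument in place while B returns a fresh list — the equivalence proved here is about
-- the return value.


-- ===== PORT A =====
-- One step of the inner loop body at index i: the four ifs are checked in order on the
-- mutated cells, but at most one of them can fire for a given pair (checked case by case),
-- so the body is this pure pair rewrite.
def rockStep (a b : String) : String × String :=
  if a = "." ∧ b = "." then (" ", ":")
  else if a = "." ∧ b = " " then (" ", ".")
  else if a = ":" ∧ b = " " then (" ", ":")
  else if a = ":" ∧ b = "." then (".", ":")
  else (a, b)

-- The inner 'for i in range(len(segment)-1)' loop: it only ever touches cells i and i+1,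
-- left to right, so it is this left-to-right pair recursion over the same state.
def rockPass : List String → List String
  | a :: b :: rest => (rockStep a b).1 :: rockPass ((rockStep a b).2 :: rest)
  | xs => xs
termination_by xs => xs.length

-- 'for _ in range(len(segment))': len(segment) never changes (the body only swaps cells).
def falling_rock (segment : List String) : List String :=
  (List.range segment.length).foldl (fun s _ => rockPass s) segment

-- ===== PORT B =====
-- Source B helper _mass
def cellMass (c : String) : Nat := if c = ":" then 2 else if c = "." then 1 else 0

-- Source B helper _settle
def rockSettle (n t : Nat) : List String :=
  List.replicate (n - t / 2 - t % 2) " " ++ List.replicate (t % 2) "." ++ List.replicate (t / 2) ":"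

-- Source B's 'for c in segment' loop with its accumulator state (out via the recursion, n, t)
def altGo : List String → Nat → Nat → List String
  | [], n, t => rockSettle n t
  | c :: rest, n, t =>
      if c = " " ∨ c = "." ∨ c = ":" then altGo rest (n + 1) (t + cellMass c)
      else rockSettle n t ++ c :: altGo rest 0 0

def falling_rock_alt (segment : List String) : List String := altGo segment 0 0

-- ===== PRECONDITION & SPEC =====
-- (no Pre_: the Python A is total)
def Spec_falling_rock (segment : List String) (out : List String) : Prop := out = falling_rock_alt segment
instance (segment : List String) (out : List String) : Decidable (Spec_falling_rock segment out) := by unfold Spec_falling_rock; infer_instance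

-- ===== CLAIM (what is proved, stated in full; the proofs are below) =====
def Claim_equal_falling_rock : Prop := ∀ (segment : List String), Dom_falling_rock segment → Spec_falling_rock segment (falling_rock segment)

-- ===== LEMMAS AND PROOFS =====

def rtotal (s : List String) : Nat := (s.map cellMass).sum

theorem rtotal_cons (a : String) (s : List String) : rtotal (a :: s) = cellMass a + rtotal s := by
  simp [rtotal]

theorem cellMass_le_two (x : String) : cellMass x ≤ 2 := by
  unfold cellMass; split_ifs <;> omega

theorem rtotal_le (s : List String) : rtotal s ≤ 2 * s.length := by
  induction s with
  | nil => simp [rtotal]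
  | cons a t ih => rw [rtotal_cons]; have := cellMass_le_two a; simp only [List.length_cons]; omega

theorem rockPass_nil : rockPass [] = [] := by rw [rockPass]; simp

theorem rockPass_one (a : String) : rockPass [a] = [a] := by rw [rockPass]; simp

theorem rockPass_cons2 (a b : String) (rest : List String) :
    rockPass (a :: b :: rest) = (rockStep a b).1 :: rockPass ((rockStep a b).2 :: rest) := by
  rw [rockPass]

theorem rockStep_w (a b : String) :
    cellMass (rockStep a b).1 + cellMass (rockStep a b).2 = cellMass a + cellMass b := by
  unfold rockStep
  split_ifs with h1 h2 h3 h4 <;>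
    first
      | (obtain ⟨ha, hb⟩ := h1; subst ha; subst hb; rfl)
      | (obtain ⟨ha, hb⟩ := h2; subst ha; subst hb; rfl)
      | (obtain ⟨ha, hb⟩ := h3; subst ha; subst hb; rfl)
      | (obtain ⟨ha, hb⟩ := h4; subst ha; subst hb; rfl)
      | rfl

theorem rockStep_colon (a : String) : rockStep a ":" = (a, ":") := by
  unfold rockStep
  split_ifs with h1 h2 h3 h4 <;>
    first
      | (exact absurd h1.2 (by decide))
      | (exact absurd h2.2 (by decide))
      | (exact absurd h3.2 (by decide))
      | (exact absurd h4.2 (by decide))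
      | rfl

theorem rockStep_space (b : String) : rockStep " " b = (" ", b) := by
  unfold rockStep
  split_ifs with h1 h2 h3 h4 <;>
    first
      | (exact absurd h1.1 (by decide))
      | (exact absurd h2.1 (by decide))
      | (exact absurd h3.1 (by decide))
      | (exact absurd h4.1 (by decide))
      | rfl

theorem rockStep_wall_left (w b : String) (hw : ¬(w = " " ∨ w = "." ∨ w = ":")) :
    rockStep w b = (w, b) := by
  unfold rockStep
  split_ifs with h1 h2 h3 h4 <;> first | rfl | (exfalso; exact hw (by tauto))

theorem rockStep_wall_right (a w : String) (hw : ¬(w = " " ∨ w = "." ∨ w = ":")) :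
    rockStep a w = (a, w) := by
  unfold rockStep
  split_ifs with h1 h2 h3 h4 <;>
    first
      | rfl
      | (exfalso; exact hw (Or.inr (Or.inl h1.2)))
      | (exfalso; exact hw (Or.inl h2.2))
      | (exfalso; exact hw (Or.inl h3.2))
      | (exfalso; exact hw (Or.inr (Or.inl h4.2)))

theorem rockStep_mem (a b : String)
    (ha : a = " " ∨ a = "." ∨ a = ":") (hb : b = " " ∨ b = "." ∨ b = ":") :
    ((rockStep a b).1 = " " ∨ (rockStep a b).1 = "." ∨ (rockStep a b).1 = ":") ∧
    ((rockStep a b).2 = " " ∨ (rockStep a b).2 = "." ∨ (rockStep a b).2 = ":") := by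
  rcases ha with h | h | h <;> rcases hb with h' | h' | h' <;> subst h <;> subst h' <;> decide

theorem rockStep_cases (a b : String)
    (ha : a = " " ∨ a = "." ∨ a = ":") (hb : b = " " ∨ b = "." ∨ b = ":") :
    (rockStep a b).1 = " " ∨ (rockStep a b).2 = ":" := by
  rcases ha with h | h | h <;> rcases hb with h' | h' | h' <;> subst h <;> subst h' <;> decide

theorem rockPass_total : ∀ (rest : List String) (a : String),
    rtotal (rockPass (a :: rest)) = rtotal (a :: rest) := by
  intro rest
  induction rest with
  | nil => intro a; rw [rockPass_one]
  | cons b r ih =>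
    intro a
    rw [rockPass_cons2, rtotal_cons, ih, rtotal_cons, rtotal_cons, rtotal_cons]
    have := rockStep_w a b
    omega

theorem rockPass_length : ∀ (rest : List String) (a : String),
    (rockPass (a :: rest)).length = rest.length + 1 := by
  intro rest
  induction rest with
  | nil => intro a; rw [rockPass_one]; rfl
  | cons b r ih =>
    intro a
    rw [rockPass_cons2]
    simp [ih]

theorem rockPass_mem : ∀ (rest : List String) (a : String),
    (∀ x ∈ a :: rest, x = " " ∨ x = "." ∨ x = ":") →
    ∀ x ∈ rockPass (a :: rest), x = " " ∨ x = "." ∨ x = ":" := by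
  intro rest
  induction rest with
  | nil => intro a h; rw [rockPass_one]; exact h
  | cons b r ih =>
    intro a h
    have ha := h a (by simp)
    have hb := h b (by simp)
    have hs := rockStep_mem a b ha hb
    rw [rockPass_cons2]
    intro x hx
    rcases List.mem_cons.mp hx with hx | hx
    · subst hx; exact hs.1
    · refine ih (rockStep a b).2 ?_ x hx
      intro y hy
      rcases List.mem_cons.mp hy with hy | hy
      · subst hy; exact hs.2
      · exact h y (by simp [hy])

theorem rockPass_append_colon : ∀ (ys : List String) (a : String),
    rockPass ((a :: ys) ++ [":"]) = rockPass (a :: ys) ++ [":"] := by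
  intro ys
  induction ys with
  | nil =>
    intro a
    simp only [List.nil_append, List.cons_append]
    rw [rockPass_cons2, rockStep_colon, rockPass_one, rockPass_one]; rfl
  | cons b r ih =>
    intro a
    simp only [List.cons_append]
    rw [rockPass_cons2 a b (r ++ [":"]), rockPass_cons2 a b r]
    have := ih (rockStep a b).2
    simp only [List.cons_append] at this
    rw [this]
    rfl

-- draining: with mass ≥ 2 one pass ends in ':'
theorem rockPass_drain : ∀ (rest : List String) (a : String),
    (∀ x ∈ a :: rest, x = " " ∨ x = "." ∨ x = ":") →
    2 ≤ rtotal (a :: rest) →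
    ∃ ys, rockPass (a :: rest) = ys ++ [":"] := by
  intro rest
  induction rest with
  | nil =>
    intro a h ht
    have ha := h a (by simp)
    have : a = ":" := by
      rcases ha with h' | h' | h' <;> subst h' <;> simp [rtotal, cellMass] at ht ⊢
    subst this
    exact ⟨[], by rw [rockPass_one]; rfl⟩
  | cons b r ih =>
    intro a h ht
    have ha := h a (by simp)
    have hb := h b (by simp)
    have hmem : ∀ x ∈ (rockStep a b).2 :: r, x = " " ∨ x = "." ∨ x = ":" := by
      intro y hy
      rcases List.mem_cons.mp hy with hy | hy
      · subst hy; exact (rockStep_mem a b ha hb).2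
      · exact h y (by simp [hy])
    have htot : 2 ≤ rtotal ((rockStep a b).2 :: r) := by
      rcases rockStep_cases a b ha hb with h1 | h2
      · have hw := rockStep_w a b
        have h0 : cellMass (rockStep a b).1 = 0 := by rw [h1]; rfl
        rw [rtotal_cons]
        rw [rtotal_cons, rtotal_cons] at ht
        omega
      · rw [rtotal_cons, h2]
        simp [cellMass]
    obtain ⟨ys, hys⟩ := ih (rockStep a b).2 hmem htot
    refine ⟨(rockStep a b).1 :: ys, ?_⟩
    rw [rockPass_cons2, hys]
    rfl

-- mass 1: one pass settles everything
theorem rockPass_one_mass : ∀ (rest : List String) (a : String),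
    (∀ x ∈ a :: rest, x = " " ∨ x = "." ∨ x = ":") →
    rtotal (a :: rest) = 1 →
    rockPass (a :: rest) = List.replicate rest.length " " ++ ["."] := by
  intro rest
  induction rest with
  | nil =>
    intro a h ht
    have ha := h a (by simp)
    have : a = "." := by
      rcases ha with h' | h' | h' <;> subst h' <;> simp [rtotal, cellMass] at ht ⊢
    subst this
    rw [rockPass_one]; rfl
  | cons b r ih =>
    intro a h ht
    have ha := h a (by simp)
    have hb := h b (by simp)
    have htail : ∀ x ∈ b :: r, x = " " ∨ x = "." ∨ x = ":" := fun y hy => h y (by simp [List.mem_cons.mp hy |>.elim (fun e => Or.inl e) Or.inr])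
    rcases ha with h' | h' | h'
    · -- a = " "
      subst h'
      rw [rockPass_cons2, rockStep_space]
      have : rtotal (b :: r) = 1 := by
        rw [rtotal_cons] at ht; simp [cellMass] at ht; omega
      rw [ih b htail this]
      simp [List.replicate_succ]
    · -- a = "."
      subst h'
      rw [rtotal_cons, rtotal_cons] at ht
      have hwa : cellMass "." = 1 := rfl
      have hb0 : cellMass b = 0 ∧ rtotal r = 0 := by omega
      have hbsp : b = " " := by
        rcases hb with e | e | e <;> subst e <;> first | rfl | (exfalso; simp [cellMass] at hb0)
      subst hbsp
      rw [rockPass_cons2]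
      have hstep : rockStep "." " " = (" ", ".") := by decide
      rw [hstep]
      have hmem : ∀ x ∈ "." :: r, x = " " ∨ x = "." ∨ x = ":" := by
        intro y hy
        rcases List.mem_cons.mp hy with hy | hy
        · subst hy; exact Or.inr (Or.inl rfl)
        · exact h y (by simp [hy])
      have htot : rtotal ("." :: r) = 1 := by rw [rtotal_cons]; simp [cellMass]; omega
      rw [ih "." hmem htot]
      simp [List.replicate_succ]
    · -- a = ":" impossible
      exfalso
      subst h'
      rw [rtotal_cons] at ht
      simp [cellMass] at ht
      omega

theorem all_zero_spaces : ∀ (s : List String),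
    (∀ x ∈ s, x = " " ∨ x = "." ∨ x = ":") → rtotal s = 0 → s = List.replicate s.length " " := by
  intro s
  induction s with
  | nil => intro _ _; rfl
  | cons a t ih =>
    intro h ht
    rw [rtotal_cons] at ht
    have ha := h a (by simp)
    have haz : a = " " := by
      rcases ha with e | e | e <;> subst e <;> first | rfl | (exfalso; simp [cellMass] at ht)
    subst haz
    have := ih (fun y hy => h y (by simp [hy])) (by omega)
    rw [List.length_cons, List.replicate_succ]
    exact congrArg _ this

-- fixed points of a pass
theorem rockPass_space_cons (t : List String) (ht : t ≠ []) :
    rockPass (" " :: t) = " " :: rockPass t := by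
  cases t with
  | nil => exact absurd rfl ht
  | cons b r => rw [rockPass_cons2, rockStep_space]

theorem rockPass_spaces (k : Nat) : rockPass (List.replicate k " ") = List.replicate k " " := by
  induction k with
  | zero => exact rockPass_nil
  | succ k ih =>
    cases k with
    | zero => exact rockPass_one " "
    | succ j =>
      rw [List.replicate_succ, rockPass_space_cons _ (by simp), ih]

theorem rockPass_spaces_dot (k : Nat) :
    rockPass (List.replicate k " " ++ ["."]) = List.replicate k " " ++ ["."] := by
  induction k with
  | zero => simpa using rockPass_one "."
  | succ k ih =>
    rw [List.replicate_succ]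
    simp only [List.cons_append]
    rw [rockPass_space_cons _ (by simp), ih]

theorem rockPass_colons (p : Nat) : rockPass (List.replicate p ":") = List.replicate p ":" := by
  induction p with
  | zero => exact rockPass_nil
  | succ p ih =>
    cases p with
    | zero => exact rockPass_one ":"
    | succ j =>
      rw [List.replicate_succ, List.replicate_succ, rockPass_cons2]
      have hstep : rockStep ":" ":" = (":", ":") := by decide
      rw [hstep, ← List.replicate_succ, ih]

theorem rockPass_dot_colons (p : Nat) :
    rockPass ("." :: List.replicate p ":") = "." :: List.replicate p ":" := by
  cases p with
  | zero => exact rockPass_one "."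
  | succ j =>
    rw [List.replicate_succ, rockPass_cons2]
    have hstep : rockStep "." ":" = (".", ":") := by decide
    rw [hstep, ← List.replicate_succ, rockPass_colons]

theorem rockSettle_fixed (n t : Nat) : rockPass (rockSettle n t) = rockSettle n t := by
  unfold rockSettle
  generalize n - t / 2 - t % 2 = i
  generalize t / 2 = p
  have ho : t % 2 = 0 ∨ t % 2 = 1 := by omega
  induction i with
  | zero =>
    rcases ho with h | h <;> rw [h]
    · simpa using rockPass_colons p
    · simpa using rockPass_dot_colons p
  | succ i ih =>
    rw [List.replicate_succ]
    simp only [List.cons_append]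
    by_cases hnil : List.replicate i " " ++ List.replicate (t % 2) "." ++ List.replicate p ":" = ([] : List String)
    · simp only [List.append_assoc] at hnil ⊢
      rw [hnil]
      exact rockPass_one " "
    · rw [List.append_assoc, rockPass_space_cons _ (by simpa [List.append_assoc] using hnil)]
      simp only [List.append_assoc] at ih ⊢
      rw [ih]

-- walls: a cell other than " ", ".", ":" never moves and nothing passes it
theorem rockPass_wall_head (w : String) (ys : List String) (hw : ¬(w = " " ∨ w = "." ∨ w = ":")) :
    rockPass (w :: ys) = w :: rockPass ys := by
  cases ys with
  | nil => rw [rockPass_one, rockPass_nil]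
  | cons y r => rw [rockPass_cons2, rockStep_wall_left _ _ hw]

theorem rockPass_wall_split' (w : String) (ys : List String) (hw : ¬(w = " " ∨ w = "." ∨ w = ":")) :
    ∀ (xs : List String) (a : String),
    rockPass ((a :: xs) ++ w :: ys) = rockPass (a :: xs) ++ w :: rockPass ys := by
  intro xs
  induction xs with
  | nil =>
    intro a
    simp only [List.nil_append, List.cons_append]
    rw [rockPass_cons2, rockStep_wall_right _ _ hw, rockPass_wall_head _ _ hw, rockPass_one]
    rfl
  | cons b r ih =>
    intro a
    simp only [List.cons_append]
    rw [rockPass_cons2 a b (r ++ w :: ys), rockPass_cons2 a b r]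
    have := ih (rockStep a b).2
    simp only [List.cons_append] at this
    rw [this]
    rfl

theorem rockPass_wall_split (xs : List String) (w : String) (ys : List String)
    (hw : ¬(w = " " ∨ w = "." ∨ w = ":")) :
    rockPass (xs ++ w :: ys) = rockPass xs ++ w :: rockPass ys := by
  cases xs with
  | nil => rw [List.nil_append, rockPass_nil, rockPass_wall_head _ _ hw]; rfl
  | cons a t => exact rockPass_wall_split' w ys hw t a

theorem iterate_wall_split (m : Nat) (xs : List String) (w : String) (ys : List String)
    (hw : ¬(w = " " ∨ w = "." ∨ w = ":")) :
    rockPass^[m] (xs ++ w :: ys) = rockPass^[m] xs ++ w :: rockPass^[m] ys := by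
  induction m generalizing xs ys with
  | zero => rfl
  | succ m ih =>
    rw [Function.iterate_succ_apply, Function.iterate_succ_apply, Function.iterate_succ_apply,
        rockPass_wall_split xs w ys hw, ih]

theorem iterate_spaces (m k : Nat) : rockPass^[m] (List.replicate k " ") = List.replicate k " " := by
  induction m with
  | zero => rfl
  | succ m ih => rw [Function.iterate_succ_apply, rockPass_spaces, ih]

theorem iterate_spaces_dot (m k : Nat) :
    rockPass^[m] (List.replicate k " " ++ ["."]) = List.replicate k " " ++ ["."] := by
  induction m with
  | zero => rfl
  | succ m ih => rw [Function.iterate_succ_apply, rockPass_spaces_dot, ih]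

theorem iterate_append_colon (m : Nat) : ∀ (ys : List String),
    rockPass^[m] (ys ++ [":"]) = rockPass^[m] ys ++ [":"] := by
  induction m with
  | zero => intro ys; rfl
  | succ m ih =>
    intro ys
    rw [Function.iterate_succ_apply, Function.iterate_succ_apply]
    cases ys with
    | nil =>
      rw [List.nil_append, rockPass_one, rockPass_nil]
      simpa using ih []
    | cons a t => rw [rockPass_append_colon t a, ih]

-- a pure chunk of length n normalises in n passes
theorem rock_main : ∀ (n : Nat) (s : List String), s.length = n →
    (∀ x ∈ s, x = " " ∨ x = "." ∨ x = ":") →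
    rockPass^[n] s = rockSettle n (rtotal s) := by
  intro n
  induction n with
  | zero =>
    intro s hl _
    rw [List.length_eq_zero_iff] at hl
    subst hl
    rfl
  | succ n ih =>
    intro s hl hmem
    cases s with
    | nil => simp at hl
    | cons a rest =>
      have hrl : rest.length = n := by simpa using hl
      by_cases h0 : rtotal (a :: rest) = 0
      · have hsp : a :: rest = List.replicate (a :: rest).length " " :=
          all_zero_spaces (a :: rest) hmem h0
        rw [hl] at hsp
        rw [h0, hsp, iterate_spaces]
        unfold rockSettle
        simp
      · by_cases h1 : rtotal (a :: rest) = 1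
        · rw [Function.iterate_succ_apply,
              rockPass_one_mass rest a hmem h1, hrl, iterate_spaces_dot, h1]
          unfold rockSettle
          simp
        · obtain ⟨t', ht'⟩ : ∃ t', rtotal (a :: rest) = t' + 2 :=
            ⟨rtotal (a :: rest) - 2, by omega⟩
          have ht2 : 2 ≤ rtotal (a :: rest) := by omega
          obtain ⟨ys, hys⟩ := rockPass_drain rest a hmem ht2
          have hylen : ys.length = n := by
            have := rockPass_length rest a
            rw [hys] at this
            simp at this
            omega
          have hytot : rtotal ys = t' := by
            have := rockPass_total rest a
            rw [hys] at this
            have h2 : rtotal (ys ++ [":"]) = rtotal ys + 2 := by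
              simp [rtotal, cellMass]
            omega
          have hymem : ∀ x ∈ ys, x = " " ∨ x = "." ∨ x = ":" := by
            intro x hx
            exact rockPass_mem rest a hmem x (hys ▸ List.mem_append_left _ hx)
          rw [ht', Function.iterate_succ_apply, hys, iterate_append_colon, ih ys hylen hymem, hytot]
          have hbound : t' ≤ 2 * n := hytot ▸ hylen ▸ rtotal_le ys
          unfold rockSettle
          have hd : (t' + 2) / 2 = t' / 2 + 1 := by omega
          have hm : (t' + 2) % 2 = t' % 2 := by omega
          rw [hd, hm]
          have hsp : n + 1 - (t' / 2 + 1) - t' % 2 = n - t' / 2 - t' % 2 := by omega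
          rw [hsp, List.replicate_succ']
          simp [List.append_assoc]

theorem chunk_main (m : Nat) (s : List String)
    (hmem : ∀ x ∈ s, x = " " ∨ x = "." ∨ x = ":") (hm : s.length ≤ m) :
    rockPass^[m] s = rockSettle s.length (rtotal s) := by
  have hsplit : m = (m - s.length) + s.length := by omega
  rw [hsplit, Function.iterate_add_apply, rock_main s.length s rfl hmem,
      Function.iterate_fixed (rockSettle_fixed s.length (rtotal s))]

theorem altGo_chunk : ∀ (s : List String) (n t : Nat),
    (∀ x ∈ s, x = " " ∨ x = "." ∨ x = ":") →
    altGo s n t = rockSettle (n + s.length) (t + rtotal s) := by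
  intro s
  induction s with
  | nil => intro n t _; simp [altGo, rtotal]
  | cons c rest ih =>
    intro n t h
    have hc := h c (by simp)
    rw [altGo, if_pos hc, ih (n + 1) (t + cellMass c) (fun y hy => h y (by simp [hy])),
        rtotal_cons]
    have e1 : n + 1 + rest.length = n + (c :: rest).length := by simp; omega
    have e2 : t + cellMass c + rtotal rest = t + (cellMass c + rtotal rest) := by omega
    rw [e1, e2]

theorem altGo_split : ∀ (xs : List String) (w : String) (ys : List String) (n t : Nat),
    (∀ x ∈ xs, x = " " ∨ x = "." ∨ x = ":") →
    ¬(w = " " ∨ w = "." ∨ w = ":") →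
    altGo (xs ++ w :: ys) n t = rockSettle (n + xs.length) (t + rtotal xs) ++ w :: altGo ys 0 0 := by
  intro xs
  induction xs with
  | nil =>
    intro w ys n t _ hw
    rw [List.nil_append, altGo, if_neg hw]
    simp [rtotal]
  | cons c rest ih =>
    intro w ys n t h hw
    have hc := h c (by simp)
    rw [List.cons_append, altGo, if_pos hc,
        ih w ys (n + 1) (t + cellMass c) (fun y hy => h y (by simp [hy])) hw, rtotal_cons]
    have e1 : n + 1 + rest.length = n + (c :: rest).length := by simp; omega
    have e2 : t + cellMass c + rtotal rest = t + (cellMass c + rtotal rest) := by omega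
    rw [e1, e2]

-- the first non-rock cell splits off a pure chunk
theorem dropWhile_head_wall (p : String → Bool) :
    ∀ (s : List String) (w : String) (ys : List String),
    s.dropWhile p = w :: ys → p w = false := by
  intro s
  induction s with
  | nil => intro w ys h; simp [List.dropWhile] at h
  | cons a t ih =>
    intro w ys h
    rw [List.dropWhile_cons] at h
    by_cases hp : p a = true
    · rw [if_pos hp] at h; exact ih w ys h
    · rw [if_neg hp] at h
      injection h with h1 _
      subst h1
      simpa using hp

theorem rock_full : ∀ (k : Nat) (s : List String) (m : Nat), s.length ≤ k → s.length ≤ m →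
    rockPass^[m] s = altGo s 0 0 := by
  intro k
  induction k with
  | zero =>
    intro s m hk _
    have : s = [] := by
      cases s with
      | nil => rfl
      | cons a t => simp at hk
    subst this
    rw [Function.iterate_fixed rockPass_nil]
    rfl
  | succ k ih =>
    intro s m hk hm
    by_cases hall : ∀ x ∈ s, x = " " ∨ x = "." ∨ x = ":"
    · rw [chunk_main m s hall hm, altGo_chunk s 0 0 hall]
      simp
    · -- split at the first wall
      set p : String → Bool := fun x => decide (x = " " ∨ x = "." ∨ x = ":") with hp
      have hrest : s.dropWhile p ≠ [] := by
        intro hnil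
        apply hall
        intro x hx
        have := List.dropWhile_eq_nil_iff.mp hnil x hx
        simpa [hp] using this
      obtain ⟨w, ys, hwy⟩ : ∃ w ys, s.dropWhile p = w :: ys := by
        cases hdw : s.dropWhile p with
        | nil => exact absurd hdw hrest
        | cons w ys => exact ⟨w, ys, rfl⟩
      have hw : ¬(w = " " ∨ w = "." ∨ w = ":") := by
        have := dropWhile_head_wall p s w ys hwy
        simpa [hp] using this
      have hxsmem : ∀ x ∈ s.takeWhile p, x = " " ∨ x = "." ∨ x = ":" := by
        intro x hx
        have := List.mem_takeWhile_imp hx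
        simpa [hp] using this
      have hdecomp : s.takeWhile p ++ w :: ys = s := by
        rw [← hwy]; exact List.takeWhile_append_dropWhile
      have hlen : (s.takeWhile p).length + (ys.length + 1) = s.length := by
        have h := congrArg List.length hdecomp
        simpa using h
      rw [← hdecomp, iterate_wall_split m _ w ys hw,
          chunk_main m (s.takeWhile p) hxsmem (by omega),
          ih ys m (by omega) (by omega),
          altGo_split _ w ys 0 0 hxsmem hw]
      simp

theorem foldl_range_iterate (n : Nat) (s : List String) :
    (List.range n).foldl (fun s _ => rockPass s) s = rockPass^[n] s := by
  induction n with
  | zero => rfl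
  | succ n ih =>
    rw [List.range_succ, List.foldl_append, ih, Function.iterate_succ_apply']
    rfl

-- ===== VERDICT (by name: the statement is the Claim_ definition above) =====
theorem falling_rock_spec : Claim_equal_falling_rock := by
  intro segment _
  unfold Spec_falling_rock falling_rock falling_rock_alt
  rw [foldl_range_iterate]
  exact rock_full segment.length segment segment.length le_rfl le_rfl
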